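-- pv_equiv track=rewrite | github.com/wulfebw/algorithms | scripts/array_string_manip/maximize_string_function.py | maximize_string_function_naive
-- ===== SOURCE A (Python) =====
-- def count_substr_occurrences(s, sub):
--     n, m = len(s), len(sub)
--     count = 0
--     for i in range(n - m + 1):
--         if s[i:i+m] == sub:
--             count += 1
--     return count
--
-- def maximize_string_function_naive(s):
--     '''
--     analysis:
--     - 2 for loops
--         + each calls count_substr_occurrences
--             * which is O(n^2) (not positive that's tight)
--     - therefore O(n^4)
--
--     '''
--     n = len(s)
--     maxscore = 0
--     for i in range(n):
--         for j in range(i+1, n+1):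
--             score = (j - i) * count_substr_occurrences(s, s[i:j])
--             maxscore = max(maxscore, score)
--     return maxscore
-- ===== SOURCE B (Python) =====
-- def maximize_string_function_naive(s):
--     # One pass per length: count every substring of that length with a dict,
--     # then take the best length * count from the counts.
--     n = len(s)
--     best = 0
--     for length in range(1, n + 1):
--         counts = {}
--         for i in range(n - length + 1):
--             t = s[i:i + length]
--             counts[t] = counts.get(t, 0) + 1
--         for c in counts.values():
--             best = max(best, length * c)
--     return best
-- ===== Notes on version B (the rewrite author's own statement) =====
-- stated objective: faster
-- what changed: Instead of recounting occurrences of every substring with a quadratic scan per (i,j) pair, B makes one pass per length that tallies all substrings of that length in a dict and takes the best length*count from the tallies.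
import Mathlib
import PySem

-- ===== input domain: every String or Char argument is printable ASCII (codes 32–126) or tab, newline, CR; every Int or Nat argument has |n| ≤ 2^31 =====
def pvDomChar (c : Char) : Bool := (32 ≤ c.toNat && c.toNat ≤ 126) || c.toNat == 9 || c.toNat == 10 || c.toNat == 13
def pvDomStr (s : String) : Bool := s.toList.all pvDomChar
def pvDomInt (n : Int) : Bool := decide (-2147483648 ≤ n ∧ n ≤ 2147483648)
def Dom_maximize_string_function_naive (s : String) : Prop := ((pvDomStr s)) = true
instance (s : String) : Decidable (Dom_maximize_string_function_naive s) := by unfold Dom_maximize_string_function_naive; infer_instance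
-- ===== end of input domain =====

-- B replaces A's per-pair quadratic occurrence recount by one counting dict per substring length
-- and takes the best length*count from the tallies (objective: faster; proved: equal return values).


-- ===== PORT A =====
def count_substr_occurrences (s sub : List Char) : Int :=
  (PySem.List.pyRange 0 ((s.length : Int) - (sub.length : Int) + 1) 1).foldl
    (fun count i =>
      if PySem.List.slice s (some i) (some (i + (sub.length : Int))) == sub then count + 1 else count)
    0

def maximize_string_function_naive (s : String) : Int :=
  let l := s.toList
  let n : Int := (l.length : Int)
  (PySem.List.pyRange 0 n 1).foldl
    (fun maxscore i =>
      (PySem.List.pyRange (i + 1) (n + 1) 1).foldl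
        (fun maxscore j =>
          max maxscore ((j - i) * count_substr_occurrences l (PySem.List.slice l (some i) (some j))))
        maxscore)
    0

-- ===== PORT B =====
def maximize_string_function_naive_alt (s : String) : Int :=
  let l := s.toList
  let n : Int := (l.length : Int)
  (PySem.List.pyRange 1 (n + 1) 1).foldl
    (fun best len =>
      let counts : PySem.Dict (List Char) Int :=
        (PySem.List.pyRange 0 (n - len + 1) 1).foldl
          (fun d i =>
            let t := PySem.List.slice l (some i) (some (i + len))
            d.insert t (d.getD t 0 + 1))
          PySem.Dict.empty
      counts.values.foldl (fun best c => max best (len * c)) best)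
    0

-- ===== PRECONDITION & SPEC =====
def Spec_maximize_string_function_naive (s : String) (out : Int) : Prop := out = maximize_string_function_naive_alt s
instance (s : String) (out : Int) : Decidable (Spec_maximize_string_function_naive s out) := by unfold Spec_maximize_string_function_naive; infer_instance

-- ===== CLAIM (what is proved, stated in full; the proofs are below) =====
def Claim_equal_maximize_string_function_naive : Prop := ∀ (s : String), Dom_maximize_string_function_naive s → Spec_maximize_string_function_naive s (maximize_string_function_naive s)

-- ===== LEMMAS AND PROOFS =====

-- all substrings of l of length len (by start position), exactly as B's inner dict loop sees them
def pvSubs (l : List Char) (len : Int) : List (List Char) :=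
  (PySem.List.pyRange 0 ((l.length : Int) - len + 1) 1).map
    (fun i => PySem.List.slice l (some i) (some (i + len)))

-- A's flattened score list: one score per pair (i, j)
def pvLA (l : List Char) : List Int :=
  (PySem.List.pyRange 0 ((l.length : Int)) 1).flatMap
    (fun i => (PySem.List.pyRange (i + 1) ((l.length : Int) + 1) 1).map
      (fun j => (j - i) * count_substr_occurrences l (PySem.List.slice l (some i) (some j))))

-- B's flattened score list: one score per length and distinct substring of that length
def pvLB (l : List Char) : List Int :=
  (PySem.List.pyRange 1 ((l.length : Int) + 1) 1).flatMap
    (fun len => (PySem.Set.ofList (pvSubs l len)).map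
      (fun t => len * ((pvSubs l len).count t : Int)))

-- flatten a nested max-fold
theorem pv_foldl_max_flat {α : Type} (outer : List α) (inner : α → List Int) (a : Int) :
    outer.foldl (fun acc x => (inner x).foldl max acc) a = (outer.flatMap inner).foldl max a := by
  induction outer generalizing a with
  | nil => rfl
  | cons x xs ih => simp [List.foldl_append, ih]

-- A is the max-fold over its flattened score list
theorem pvA_eq_fold (s : String) :
    maximize_string_function_naive s = (pvLA s.toList).foldl max 0 := by
  simp only [maximize_string_function_naive, pvLA]
  rw [← pv_foldl_max_flat]
  simp only [List.foldl_map]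

-- B is the max-fold over its flattened score list (the dict is a counter over pvSubs)
theorem pvB_eq_fold (s : String) :
    maximize_string_function_naive_alt s = (pvLB s.toList).foldl max 0 := by
  simp only [maximize_string_function_naive_alt, pvLB]
  rw [← pv_foldl_max_flat]
  apply PySem.List.foldl_congr_mem
  intro acc len _
  have hd : (PySem.List.pyRange 0 ((s.toList.length : Int) - len + 1) 1).foldl
      (fun (d : PySem.Dict (List Char) Int) i =>
        let t := PySem.List.slice s.toList (some i) (some (i + len))
        d.insert t (d.getD t 0 + 1))
      PySem.Dict.empty = PySem.Dict.counter (pvSubs s.toList len) := by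
    rw [← PySem.Dict.foldl_insert_getD_add_one_eq_counter, pvSubs, List.foldl_map]
  rw [hd, PySem.Dict.values_eq_map_keys _ (PySem.Dict.nodup_keys_counter _) 0,
    PySem.Dict.keys_counter]
  simp only [List.foldl_map, PySem.Dict.getD_counter]

-- A's occurrence counter counts exactly the members of pvSubs equal to sub
theorem pv_cnt_eq_count (l sub : List Char) :
    count_substr_occurrences l sub = ((pvSubs l (sub.length : Int)).count sub : Int) := by
  simp only [count_substr_occurrences, pvSubs, PySem.List.foldl_count_if, List.count,
    List.countP_map]
  simp [Function.comp_def]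

-- the length of a slice with in-range bounds
theorem pv_len_slice (l : List Char) (i j : Int) (h0 : 0 ≤ i) (hij : i ≤ j) (hj : j ≤ (l.length : Int)) :
    ((PySem.List.slice l (some i) (some j)).length : Int) = j - i := by
  rw [PySem.List.slice_toNat l h0 (le_trans h0 hij)]
  simp only [List.length_take, List.length_drop]
  omega

-- the two flattened score lists have the same members
theorem pv_mem_LA_iff_mem_LB (l : List Char) (v : Int) : v ∈ pvLA l ↔ v ∈ pvLB l := by
  simp only [pvLA, pvLB, pvSubs, List.mem_flatMap, List.mem_map, PySem.List.mem_pyRange_one,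
    PySem.Set.mem_ofList]
  constructor
  · rintro ⟨i, ⟨hi0, hin⟩, j, ⟨hij, hjn⟩, rfl⟩
    refine ⟨j - i, ⟨by omega, by omega⟩, PySem.List.slice l (some i) (some j), ?_, ?_⟩
    · refine ⟨i, ⟨hi0, by omega⟩, ?_⟩
      have : i + (j - i) = j := by ring
      rw [this]
    · have hlen : ((PySem.List.slice l (some i) (some j)).length : Int) = j - i :=
        pv_len_slice l i j hi0 (by omega) (by omega)
      rw [pv_cnt_eq_count, hlen, pvSubs]
  · rintro ⟨len, ⟨hl1, hln⟩, t, ⟨i, ⟨hi0, hin⟩, rfl⟩, rfl⟩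
    refine ⟨i, ⟨hi0, by omega⟩, i + len, ⟨by omega, by omega⟩, ?_⟩
    have hlen : ((PySem.List.slice l (some i) (some (i + len))).length : Int) = (i + len) - i :=
      pv_len_slice l i (i + len) hi0 (by omega) (by omega)
    have h2 : i + len - i = len := by ring
    rw [pv_cnt_eq_count, hlen, h2, pvSubs]

theorem maximize_string_function_naive_spec_aux (s : String) :
    maximize_string_function_naive s = maximize_string_function_naive_alt s := by
  rw [pvA_eq_fold, pvB_eq_fold]
  apply le_antisymm
  · rcases PySem.List.foldl_max_mem (pvLA s.toList) 0 with h | h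
    · rw [h]; exact (PySem.List.le_foldl_max (pvLB s.toList) 0).1
    · exact (PySem.List.le_foldl_max (pvLB s.toList) 0).2 _
        ((pv_mem_LA_iff_mem_LB s.toList _).mp h)
  · rcases PySem.List.foldl_max_mem (pvLB s.toList) 0 with h | h
    · rw [h]; exact (PySem.List.le_foldl_max (pvLA s.toList) 0).1
    · exact (PySem.List.le_foldl_max (pvLA s.toList) 0).2 _
        ((pv_mem_LA_iff_mem_LB s.toList _).mpr h)

-- ===== VERDICT (by name: the statement is the Claim_ definition above) =====
theorem maximize_string_function_naive_spec : Claim_equal_maximize_string_function_naive := by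
  intro s _
  exact maximize_string_function_naive_spec_aux s
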